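-- pv_equiv track=rewrite | github.com/jcolinpatrick/kryptos | scripts/transposition/e_k2_coords_transposition.py | rank_key
-- ===== SOURCE A (Python) =====
-- from typing import List, Tuple, Optional
--
-- def rank_key(digits: List[int], myszkowski: bool = False) -> List[int]:
--     """Convert digit sequence to rank order (0-indexed).
--     If myszkowski=True, equal digits get the same rank.
--     Otherwise, ties broken left-to-right."""
--     n = len(digits)
--     if myszkowski:
--         sorted_unique = sorted(set(digits))
--         rank_map = {v: i for i, v in enumerate(sorted_unique)}
--         return [rank_map[d] for d in digits]
--     else:
--         indexed = sorted(range(n), key=lambda i: (digits[i], i))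
--         ranks = [0] * n
--         for rank, idx in enumerate(indexed):
--             ranks[idx] = rank
--         return ranks
-- ===== SOURCE B (Python) =====
-- def rank_key(digits, myszkowski=False):
--     """Rank by counting comparisons instead of sorting an index permutation."""
--     if myszkowski:
--         return [len({x for x in digits if x < d}) for d in digits]
--     return [sum(1 for x in digits if x < d) + sum(1 for x in digits[:i] if x == d)
--             for i, d in enumerate(digits)]
-- ===== Notes on version B (the rewrite author's own statement) =====
-- stated objective: alternative
-- what changed: Replaces sorting (argsort of indices with a rank-assignment pass, resp. sorted-unique-values rank map) by direct counting: each element's rank is the count of strictly smaller elements plus earlier equal elements (resp. the count of distinct smaller values).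
import Mathlib
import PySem

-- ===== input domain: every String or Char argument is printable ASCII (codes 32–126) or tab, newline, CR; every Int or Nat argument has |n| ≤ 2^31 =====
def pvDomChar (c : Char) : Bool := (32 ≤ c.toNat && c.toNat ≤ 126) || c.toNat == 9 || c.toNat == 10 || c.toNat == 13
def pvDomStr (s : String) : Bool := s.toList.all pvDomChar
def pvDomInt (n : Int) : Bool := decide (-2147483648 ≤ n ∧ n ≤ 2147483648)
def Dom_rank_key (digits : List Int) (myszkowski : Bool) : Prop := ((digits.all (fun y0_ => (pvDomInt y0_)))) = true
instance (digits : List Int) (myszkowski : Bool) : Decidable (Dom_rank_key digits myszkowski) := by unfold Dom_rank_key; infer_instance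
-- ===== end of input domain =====

-- B replaces A's sorting passes by direct counting of smaller / earlier-equal elements; return values proved equal.

-- ===== PORT A =====
def rank_key (digits : List Int) (myszkowski : Bool) : List Int :=
  let n : Int := (digits.length : Int)
  if myszkowski then
    let sorted_unique := PySem.List.sorted (PySem.Set.ofList digits) (fun x => x) false
    let rank_map := (PySem.List.enumerate sorted_unique 0).foldl
      (fun d p => d.insert p.2 p.1) (PySem.Dict.empty : PySem.Dict Int Int)
    -- rank_map[d]: the key is always present (d ∈ digits), ported as getD
    digits.map (fun d => rank_map.getD d 0)
  else
    let indexed := PySem.List.sorted2 (PySem.List.pyRange 0 n 1)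
      (fun i => PySem.List.pyGetD digits i 0) (fun i => i) false
    let ranks := PySem.List.pyRepeat [(0 : Int)] n
    (PySem.List.enumerate indexed 0).foldl (fun r p => PySem.List.pySetD r p.2 p.1) ranks

-- ===== PORT B =====
def rank_key_alt (digits : List Int) (myszkowski : Bool) : List Int :=
  if myszkowski then
    digits.map (fun d =>
      ((PySem.Set.ofList (digits.filter (fun x => decide (x < d)))).length : Int))
  else
    (PySem.List.enumerate digits 0).map (fun p =>
      ((digits.countP (fun x => decide (x < p.2)) : Int)
        + ((PySem.List.slice digits none (some p.1)).countP (fun x => decide (x = p.2)) : Int)))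

-- ===== PRECONDITION & SPEC =====
def Spec_rank_key (digits : List Int) (myszkowski : Bool) (out : List Int) : Prop := out = rank_key_alt digits myszkowski
instance (digits : List Int) (myszkowski : Bool) (out : List Int) : Decidable (Spec_rank_key digits myszkowski out) := by unfold Spec_rank_key; infer_instance

-- ===== CLAIM (what is proved, stated in full; the proofs are below) =====
def Claim_equal_rank_key : Prop := ∀ (digits : List Int) (myszkowski : Bool), Dom_rank_key digits myszkowski → Spec_rank_key digits myszkowski (rank_key digits myszkowski)

-- ===== LEMMAS AND PROOFS =====

-- the Boolean "strictly before" relation sorted2 uses for key i ↦ (k1 i, i)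
def pvLt2 (k1 : Int → Int) (a b : Int) : Bool :=
  decide (k1 a < k1 b) || (!decide (k1 b < k1 a) && decide (a < b))

theorem pvLt2_asymm (k1 : Int → Int) (a b : Int) (h : pvLt2 k1 a b = true) : pvLt2 k1 b a = false := by
  simp only [pvLt2, Bool.or_eq_true, Bool.and_eq_true, Bool.not_eq_true',
    decide_eq_true_eq, decide_eq_false_iff_not, Bool.or_eq_false_iff, Bool.and_eq_false_iff,
    Bool.not_eq_false'] at *
  omega

theorem pvLt2_negtrans (k1 : Int → Int) (x y z : Int) (h1 : pvLt2 k1 x y = true)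
    (h2 : pvLt2 k1 z y = false) : pvLt2 k1 z x = false := by
  simp only [pvLt2, Bool.or_eq_true, Bool.and_eq_true, Bool.not_eq_true',
    decide_eq_true_eq, decide_eq_false_iff_not, Bool.or_eq_false_iff, Bool.and_eq_false_iff,
    Bool.not_eq_false'] at *
  omega

theorem pvLt2_total (k1 : Int → Int) (a b : Int) (hne : a ≠ b) (h : pvLt2 k1 a b = false) :
    pvLt2 k1 b a = true := by
  simp only [pvLt2, Bool.or_eq_true, Bool.and_eq_true, Bool.not_eq_true',
    decide_eq_true_eq, decide_eq_false_iff_not, Bool.or_eq_false_iff, Bool.and_eq_false_iff,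
    Bool.not_eq_false'] at *
  omega

-- insertBy preserves pairwise "not strictly after"
theorem pv_insertBy_pairwise (k1 : Int → Int) (x : Int) (ys : List Int)
    (h : ys.Pairwise (fun a b => pvLt2 k1 b a = false)) :
    (PySem.List.insertBy (pvLt2 k1) x ys).Pairwise (fun a b => pvLt2 k1 b a = false) := by
  induction ys with
  | nil => simp [PySem.List.insertBy]
  | cons y ys ih =>
    rw [List.pairwise_cons] at h
    obtain ⟨hy, hys⟩ := h
    by_cases hxy : pvLt2 k1 x y = true
    · rw [show PySem.List.insertBy (pvLt2 k1) x (y :: ys) = x :: y :: ys by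
        simp [PySem.List.insertBy, hxy]]
      refine List.Pairwise.cons ?_ (List.Pairwise.cons hy hys)
      intro z hz
      rcases List.mem_cons.mp hz with rfl | hz
      · exact pvLt2_asymm _ _ _ hxy
      · exact pvLt2_negtrans k1 x y z hxy (hy z hz)
    · rw [show PySem.List.insertBy (pvLt2 k1) x (y :: ys) = y :: PySem.List.insertBy (pvLt2 k1) x ys by
        simp [PySem.List.insertBy, hxy]]
      refine List.Pairwise.cons ?_ (ih hys)
      intro z hz
      rw [PySem.List.insertBy_mem_iff] at hz
      rcases hz with rfl | hz
      · exact Bool.eq_false_iff.mpr (by simpa using hxy)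
      · exact hy z hz

theorem pv_foldl_pairwise (k1 : Int → Int) (xs : List Int) (acc : List Int)
    (h : acc.Pairwise (fun a b => pvLt2 k1 b a = false)) :
    (xs.foldl (fun acc x => PySem.List.insertBy (pvLt2 k1) x acc) acc).Pairwise
      (fun a b => pvLt2 k1 b a = false) := by
  induction xs generalizing acc with
  | nil => exact h
  | cons x xs ih => exact ih _ (pv_insertBy_pairwise k1 x acc h)


theorem pv_sorted2_pairwise (xs : List Int) (k1 : Int → Int) :
    (PySem.List.sorted2 xs k1 (fun i => i) false).Pairwise (fun a b => pvLt2 k1 b a = false) := by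
  have : PySem.List.sorted2 xs k1 (fun i => i) false
      = xs.foldl (fun acc x => PySem.List.insertBy (pvLt2 k1) x acc) [] := rfl
  rw [this]
  exact pv_foldl_pairwise k1 xs [] (by simp)

theorem pv_sorted2_pairwise_strict (xs : List Int) (k1 : Int → Int) (hnd : xs.Nodup) :
    (PySem.List.sorted2 xs k1 (fun i => i) false).Pairwise (fun a b => pvLt2 k1 a b = true) := by
  have hperm := PySem.List.sorted2_perm xs k1 (fun i => i) false
  have hnd' : (PySem.List.sorted2 xs k1 (fun i => i) false).Nodup := hperm.nodup_iff.mpr hnd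
  have hpw := pv_sorted2_pairwise xs k1
  have := List.Pairwise.and hpw hnd'
  exact this.imp fun ⟨h1, h2⟩ => pvLt2_total _ _ _ (Ne.symm h2) h1

-- index of an element in a strictly ordered list = number of strictly smaller elements
theorem pv_idxOf_eq_countP (rel : Int → Int → Bool)
    (hasym : ∀ a b, rel a b = true → rel b a = false)
    (L : List Int) (hpw : L.Pairwise (fun a b => rel a b = true))
    (i : Int) (hi : i ∈ L) :
    (L.idxOf i : Int) = (L.countP (fun j => rel j i) : Int) := by
  induction L with
  | nil => simp at hi
  | cons x t ih =>
    rw [List.pairwise_cons] at hpw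
    obtain ⟨hx, hpw⟩ := hpw
    by_cases hxi : x = i
    · subst hxi
      have hxx : rel x x = false := by
        cases h : rel x x
        · rfl
        · have := hasym x x h; simp [h] at this
      have ht : t.countP (fun j => rel j x) = 0 := by
        rw [List.countP_eq_zero]
        intro j hj
        simpa using hasym x j (hx j hj)
      simp [hxx, ht]
    · have hit : i ∈ t := by rcases List.mem_cons.mp hi with h | h; exact absurd h.symm hxi; exact h
      have h1 : List.idxOf i (x :: t) = List.idxOf i t + 1 := by
        simp [hxi]
      rw [h1, List.countP_cons]
      have hxlt : rel x i = true := hx i hit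
      have h2 := ih hpw hit
      simp [hxlt]
      push_cast at h2 ⊢
      omega

-- the rank-assignment loop writes, at each position m, the position of m in L
theorem pv_assign (L : List Int) (a : Int) (r : List Int) (hnd : L.Nodup)
    (hr : ∀ x ∈ L, 0 ≤ x ∧ x < (r.length : Int)) (m : Nat) (hm : m < r.length) :
    PySem.List.pyGetD ((PySem.List.enumerate L a).foldl
        (fun r p => PySem.List.pySetD r p.2 p.1) r) (m : Int) 0
      = if (m : Int) ∈ L then a + (L.idxOf (m : Int) : Int)
        else PySem.List.pyGetD r (m : Int) 0 := by
  induction L generalizing a r with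
  | nil => simp [PySem.List.enumerate_nil]
  | cons x t ih =>
    rw [PySem.List.enumerate_cons, List.foldl_cons]
    have hx := hr x (List.mem_cons_self ..)
    have hxn : x = ((x.toNat : Nat) : Int) := by omega
    have hxlen : x.toNat < r.length := by omega
    have hset : PySem.List.pySetD r x a = r.set x.toNat a :=
      PySem.List.pySetD_of_nonneg r a hx.1
    have hlen' : (r.set x.toNat a).length = r.length := by simp
    have hr' : ∀ y ∈ t, 0 ≤ y ∧ y < ((r.set x.toNat a).length : Int) := by
      intro y hy; rw [hlen']; exact hr y (List.mem_cons_of_mem _ hy)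
    have hnd' : t.Nodup := hnd.of_cons
    have hxt : x ∉ t := (List.nodup_cons.mp hnd).1
    rw [hset, ih (a + 1) (r.set x.toNat a) hnd' hr' (by omega)]
    by_cases hmx : (m : Int) = x
    · have hmt : (m : Int) ∉ t := hmx ▸ hxt
      have : (m : Int) ∈ x :: t := by simp [hmx]
      rw [if_neg hmt, if_pos this]
      have : List.idxOf (m : Int) (x :: t) = 0 := by simp [hmx]
      rw [this]
      -- pyGetD of the set cell
      rw [show PySem.List.pyGetD (r.set x.toNat a) (m : Int) 0
            = PySem.List.pyGetD (PySem.List.pySetD r ((x.toNat : Nat) : Int) a) (m : Int) 0 by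
        rw [PySem.List.pySetD_natCast]]
      rw [PySem.List.pyGetD_pySetD_natCast r x.toNat m a 0 hxlen]
      simp [show m = x.toNat by omega]
    · have hne : ¬ m = x.toNat := by omega
      have hget : PySem.List.pyGetD (r.set x.toNat a) (m : Int) 0 = PySem.List.pyGetD r (m : Int) 0 := by
        rw [show PySem.List.pyGetD (r.set x.toNat a) (m : Int) 0
              = PySem.List.pyGetD (PySem.List.pySetD r ((x.toNat : Nat) : Int) a) (m : Int) 0 by
          rw [PySem.List.pySetD_natCast]]
        rw [PySem.List.pyGetD_pySetD_natCast r x.toNat m a 0 hxlen, if_neg hne]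
      by_cases hmt : (m : Int) ∈ t
      · rw [if_pos hmt, if_pos (List.mem_cons_of_mem _ hmt)]
        have : List.idxOf (m : Int) (x :: t) = List.idxOf (m : Int) t + 1 := by
          simp [show ¬ x = (m:Int) from fun h => hmx h.symm]
        rw [this]
        push_cast
        ring
      · rw [if_neg hmt, hget, if_neg (by simp [hmt, fun h : (m:Int) = x => hmx h])]

theorem pv_assign_length (L : List (Int × Int)) (r : List Int) :
    (L.foldl (fun r p => PySem.List.pySetD r p.2 p.1) r).length = r.length := by
  induction L generalizing r with
  | nil => rfl
  | cons p L ih => rw [List.foldl_cons, ih, PySem.List.length_pySetD]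

-- dict built from enumerate of a nodup list: getD = index
theorem pv_rankmap_getD (s : List Int) (a : Int) (dict : PySem.Dict Int Int)
    (hnd : s.Nodup) (d : Int) :
    ((PySem.List.enumerate s a).foldl (fun acc p => acc.insert p.2 p.1) dict).getD d 0
      = if d ∈ s then a + (s.idxOf d : Int) else dict.getD d 0 := by
  induction s generalizing a dict with
  | nil => simp [PySem.List.enumerate_nil]
  | cons x t ih =>
    rw [PySem.List.enumerate_cons, List.foldl_cons]
    have hxt : x ∉ t := (List.nodup_cons.mp hnd).1
    rw [ih (a + 1) _ hnd.of_cons]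
    by_cases hdx : d = x
    · subst hdx
      rw [if_neg hxt, if_pos (List.mem_cons_self ..)]
      simp [PySem.Dict.getD_insert_self]
    · by_cases hdt : d ∈ t
      · rw [if_pos hdt, if_pos (List.mem_cons_of_mem _ hdt)]
        have : List.idxOf d (x :: t) = List.idxOf d t + 1 := by
          simp [show ¬ x = d from fun h => hdx h.symm]
        rw [this]; push_cast; ring
      · rw [if_neg hdt, if_neg (by simp [hdt, hdx]), PySem.Dict.getD_insert_of_ne _ _ _ hdx]

theorem pv_countP_or (l : List Int) (p q : Int → Prop) [DecidablePred p] [DecidablePred q]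
    (h : ∀ x ∈ l, ¬ (p x ∧ q x)) :
    l.countP (fun x => decide (p x ∨ q x))
      = l.countP (fun x => decide (p x)) + l.countP (fun x => decide (q x)) := by
  induction l with
  | nil => simp
  | cons x t ih =>
    have hx := h x (List.mem_cons_self ..)
    have ht := ih (fun y hy => h y (List.mem_cons_of_mem _ hy))
    simp only [List.countP_cons, ht]
    by_cases hp : p x
    · by_cases hq : q x
      · exact absurd ⟨hp, hq⟩ hx
      · simp [hp, hq]; omega
    · by_cases hq : q x <;> simp [hp, hq]
      omega

theorem pv_map_pyGetD_prefix (digits : List Int) (m : Nat) (hm : m ≤ digits.length) :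
    (PySem.List.pyRange 0 (m : Int) 1).map (fun j => PySem.List.pyGetD digits j 0)
      = digits.take m := by
  have hsplit : PySem.List.pyRange 0 (digits.length : Int) 1
      = PySem.List.pyRange 0 (m : Int) 1 ++ PySem.List.pyRange (m : Int) (digits.length : Int) 1 :=
    PySem.List.pyRange_one_append 0 (m : Int) (digits.length : Int) (by omega) (by omega)
  have hall : (PySem.List.pyRange 0 (digits.length : Int) 1).map (fun j => PySem.List.pyGetD digits j 0) = digits :=
    PySem.List.map_pyGetD_pyRange_zero' digits 0
  rw [hsplit, List.map_append] at hall
  have hlen : ((PySem.List.pyRange 0 (m : Int) 1).map (fun j => PySem.List.pyGetD digits j 0)).length = m := by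
    simp [PySem.List.length_pyRange_one]
  calc (PySem.List.pyRange 0 (m : Int) 1).map (fun j => PySem.List.pyGetD digits j 0)
      = (((PySem.List.pyRange 0 (m : Int) 1).map (fun j => PySem.List.pyGetD digits j 0))
          ++ (PySem.List.pyRange (m : Int) (digits.length : Int) 1).map (fun j => PySem.List.pyGetD digits j 0)).take m := (List.take_left' hlen).symm
    _ = digits.take m := by rw [hall]

theorem pv_branch_default (digits : List Int) :
    rank_key digits false = rank_key_alt digits false := by
  set n := digits.length with hn
  set k1 := fun i : Int => PySem.List.pyGetD digits i 0 with hk1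
  set rng := PySem.List.pyRange 0 (n : Int) 1 with hrng
  set idx := PySem.List.sorted2 rng k1 (fun i => i) false with hidx
  have hA : rank_key digits false
      = (PySem.List.enumerate idx 0).foldl (fun r p => PySem.List.pySetD r p.2 p.1)
          (PySem.List.pyRepeat [(0 : Int)] (n : Int)) := rfl
  have hB : rank_key_alt digits false
      = (PySem.List.enumerate digits 0).map (fun p =>
          ((digits.countP (fun x => decide (x < p.2)) : Int)
            + ((PySem.List.slice digits none (some p.1)).countP (fun x => decide (x = p.2)) : Int))) := rfl
  have hr0 : PySem.List.pyRepeat [(0 : Int)] (n : Int) = List.replicate n (0 : Int) := by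
    rw [PySem.List.pyRepeat_singleton]; simp
  rw [hA, hB, hr0]
  have hndrng : rng.Nodup := PySem.List.nodup_pyRange_one 0 (n : Int)
  have hperm := PySem.List.sorted2_perm rng k1 (fun i => i) false
  have hndidx : idx.Nodup := hperm.nodup_iff.mpr hndrng
  have hmemidx : ∀ x : Int, x ∈ idx ↔ (0 ≤ x ∧ x < (n : Int)) := by
    intro x; rw [hidx]; rw [List.Perm.mem_iff hperm, hrng, PySem.List.mem_pyRange_one]
  have hlenL : ((PySem.List.enumerate idx 0).foldl (fun r p => PySem.List.pySetD r p.2 p.1)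
      (List.replicate n (0 : Int))).length = n := by
    rw [pv_assign_length]; simp
  have hlenR : ((PySem.List.enumerate digits 0).map (fun p =>
          ((digits.countP (fun x => decide (x < p.2)) : Int)
            + ((PySem.List.slice digits none (some p.1)).countP (fun x => decide (x = p.2)) : Int)))).length = n := by
    simp only [List.length_map, PySem.List.length_enumerate, hn]
  apply List.ext_getElem (by rw [hlenL, hlenR])
  intro m hm1 hm2
  have hmn : m < n := by rw [hlenL] at hm1; exact hm1
  have hmd : m < digits.length := hmn
  set dm := digits[m] with hdm
  have hk1m : k1 (m : Int) = dm := by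
    show PySem.List.pyGetD digits ((m : Nat) : Int) 0 = dm
    rw [PySem.List.pyGetD_natCast, List.getD_eq_getElem]
  -- LHS
  have hL : ((PySem.List.enumerate idx 0).foldl (fun r p => PySem.List.pySetD r p.2 p.1)
        (List.replicate n (0 : Int)))[m]
      = 0 + (idx.idxOf (m : Int) : Int) := by
    have hget : ((PySem.List.enumerate idx 0).foldl (fun r p => PySem.List.pySetD r p.2 p.1)
          (List.replicate n (0 : Int)))[m]
        = PySem.List.pyGetD ((PySem.List.enumerate idx 0).foldl
            (fun r p => PySem.List.pySetD r p.2 p.1) (List.replicate n (0 : Int))) (m : Int) 0 := by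
      rw [PySem.List.pyGetD_natCast, List.getD_eq_getElem]
    rw [hget, pv_assign idx 0 _ hndidx
        (by intro x hx; have := (hmemidx x).mp hx; simp; omega)
        m (by simp; omega),
      if_pos ((hmemidx (m : Int)).mpr (by constructor <;> omega))]
  rw [hL]
  -- idxOf = countP over idx, then over rng
  rw [pv_idxOf_eq_countP (pvLt2 k1) (pvLt2_asymm k1) idx
      (pv_sorted2_pairwise_strict rng k1 hndrng) (m : Int)
      ((hmemidx (m : Int)).mpr (by constructor <;> omega)),
    List.Perm.countP_eq _ hperm]
  -- split the count
  have hsplit : rng.countP (fun j => pvLt2 k1 j (m : Int))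
      = rng.countP (fun j => decide (k1 j < dm))
        + rng.countP (fun j => decide (k1 j = dm ∧ j < (m : Int))) := by
    have h1 : rng.countP (fun j => pvLt2 k1 j (m : Int))
        = rng.countP (fun j => decide ((k1 j < dm) ∨ (k1 j = dm ∧ j < (m : Int)))) := by
      apply List.countP_congr
      intro j hj
      simp only [pvLt2, hk1m, Bool.or_eq_true, Bool.and_eq_true, Bool.not_eq_true',
        decide_eq_true_eq, decide_eq_false_iff_not]
      constructor <;> (intro h; omega)
    rw [h1, pv_countP_or rng (fun j => k1 j < dm) (fun j => k1 j = dm ∧ j < (m : Int))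
      (by intro x hx; omega)]
  rw [hsplit]
  -- first count over rng = count over digits
  have hc1 : rng.countP (fun j => decide (k1 j < dm)) = digits.countP (fun x => decide (x < dm)) := by
    conv_rhs => rw [← PySem.List.map_pyGetD_pyRange_zero' digits 0]
    rw [List.countP_map]
    rfl
  -- second count over rng = count over the prefix
  have hc2 : rng.countP (fun j => decide (k1 j = dm ∧ j < (m : Int)))
      = (digits.take m).countP (fun x => decide (x = dm)) := by
    rw [hrng, PySem.List.pyRange_one_append 0 (m : Int) (n : Int) (by omega) (by omega),
      List.countP_append]
    have hzero : (PySem.List.pyRange (m : Int) (n : Int) 1).countP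
        (fun j => decide (k1 j = dm ∧ j < (m : Int))) = 0 := by
      rw [List.countP_eq_zero]
      intro j hj
      rw [PySem.List.mem_pyRange_one] at hj
      simp
      omega
    rw [hzero, Nat.add_zero]
    have hcongr : (PySem.List.pyRange 0 (m : Int) 1).countP
          (fun j => decide (k1 j = dm ∧ j < (m : Int)))
        = (PySem.List.pyRange 0 (m : Int) 1).countP (fun j => decide (k1 j = dm)) := by
      apply List.countP_congr
      intro j hj
      rw [PySem.List.mem_pyRange_one] at hj
      simp
      intro _
      omega
    rw [hcongr, ← pv_map_pyGetD_prefix digits m (by omega), List.countP_map]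
    rfl
  rw [hc1, hc2]
  -- RHS
  rw [List.getElem_map, PySem.List.getElem_enumerate]
  have hsl : PySem.List.slice digits none (some ((0 : Int) + (m : Int)))
      = digits.take m := by
    rw [show (0 : Int) + (m : Int) = ((m : Nat) : Int) by omega, PySem.List.slice_to_natCast]
  simp only [hsl, ← hdm]
  push_cast
  ring

theorem pv_branch_mysz (digits : List Int) :
    rank_key digits true = rank_key_alt digits true := by
  have hs : rank_key digits true
      = digits.map (fun d =>
          ((PySem.List.enumerate (PySem.List.sorted (PySem.Set.ofList digits) (fun x => x) false) 0).foldl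
            (fun acc p => acc.insert p.2 p.1) (PySem.Dict.empty : PySem.Dict Int Int)).getD d 0) := rfl
  rw [hs]
  show _ = digits.map _
  apply List.map_congr_left
  intro d hd
  set s := PySem.List.sorted (PySem.Set.ofList digits) (fun x => x) false with hsdef
  have hpwlt : s.Pairwise (· < ·) := PySem.List.sorted_ofList_pairwise_lt digits
  have hnd : s.Nodup := hpwlt.imp (fun h => ne_of_lt h)
  have hmem : ∀ x : Int, x ∈ s ↔ x ∈ digits := by
    intro x; rw [hsdef, PySem.List.mem_sorted, PySem.Set.mem_ofList]
  have hds : d ∈ s := (hmem d).mpr hd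
  rw [pv_rankmap_getD s 0 _ hnd d, if_pos hds]
  have hrel : ∀ a b : Int, (fun a b : Int => decide (a < b)) a b = true → (fun a b : Int => decide (a < b)) b a = false := by
    intro a b h; simp at *; omega
  have hpw' : s.Pairwise (fun a b => decide (a < b) = true) := hpwlt.imp (fun h => decide_eq_true h)
  rw [pv_idxOf_eq_countP (fun a b => decide (a < b)) hrel s hpw' d hds]
  have hperm : (s.filter (fun j => decide (j < d))).Perm
      (PySem.Set.ofList (digits.filter (fun x => decide (x < d)))) := by
    rw [List.perm_ext_iff_of_nodup (hnd.filter _) (PySem.Set.nodup_ofList _)]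
    intro x
    simp only [PySem.Set.mem_ofList, List.mem_filter, hmem x]
  rw [List.countP_eq_length_filter, hperm.length_eq]
  ring

-- ===== VERDICT (by name: the statement is the Claim_ definition above) =====
theorem rank_key_spec : Claim_equal_rank_key := by
  intro digits myszkowski _
  unfold Spec_rank_key
  cases myszkowski
  · exact pv_branch_default digits
  · exact pv_branch_mysz digits
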